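-- pv_equiv track=rewrite | github.com/wjdgoruds2/Code_Algorithm | programmers/단체사진 찍기.py | solution
-- ===== SOURCE A (Python) =====
-- from itertools import permutations
--
-- def solution(n,data):
--     answer=0
--     people=['A','C','F','J','M','N','R','T']
--     pairs = list(map(list, permutations(people, 8)))
--     for i in pairs: #전체 경우의 쌍
--         for j in data:
--             first, second, case, num=j[0],j[2],j[3],int(j[4])
--             n1 = i.index(first)
--             n2 = i.index(second)
--             if case == '=': ########전체 경우의 수- 아닌 경우의 수
--                 if int(abs(n1 - n2)) - 1 != num:
--                     answer += 1
--                     break ####다음 pair케이스로 넘어감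
--             elif case == '<':
--                 if int(abs(n1 - n2)) - 1 >= num:
--                     answer += 1
--                     break
--             elif case == '>':
--                 if int(abs(n1 - n2)) - 1 <= num:
--                     answer += 1
--                     break
--     return len(pairs)-answer
-- ===== SOURCE B (Python) =====
-- def _sat(d, op, num):
--     if op == '=':
--         return d - 1 == num
--     if op == '<':
--         return d - 1 < num
--     if op == '>':
--         return d - 1 > num
--     return True
--
--
-- def _check(cons, placed, p):
--     # constraints involving p whose endpoints are now all placed must hold
--     new = placed + [p]
--     for a, b, op, num in cons:
--         if (a == p or b == p) and a in new and b in new: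
--             q = b if a == p else a
--             if not _sat(len(placed) - new.index(q), op, num):
--                 return False
--     return True
--
--
-- def _extend(cons, placed, remaining):
--     # number of ways to extend the partial row `placed` with all of `remaining`
--     if not remaining:
--         return 1
--     return _loop(cons, placed, [], remaining)
--
--
-- def _loop(cons, placed, pre, rest):
--     if not rest:
--         return 0
--     p, rs = rest[0], rest[1:]
--     sub = _extend(cons, placed + [p], pre + rs) if _check(cons, placed, p) else 0
--     return sub + _loop(cons, placed, pre + [p], rs)
--
--
-- def solution(n, data):
--     cons = [(j[0], j[2], j[3], int(j[4])) for j in data]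
--     return _extend(cons, [], ['A', 'C', 'F', 'J', 'M', 'N', 'R', 'T'])
-- ===== Notes on version B (the rewrite author's own statement) =====
-- stated objective: alternative
-- what changed: B replaces A's generate-and-test over all 40320 precomputed permutations (count violators with an early break, subtract from the total) by a recursive backtracking search that places people one position at a time, checks each constraint as soon as both of its people are placed, prunes the branch on a violation, and sums the completed arrangements.
-- outside the precondition, e.g. on solution(0, ['A~C=9', 'XX']): A returns 0, B raises IndexError
import Mathlib
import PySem

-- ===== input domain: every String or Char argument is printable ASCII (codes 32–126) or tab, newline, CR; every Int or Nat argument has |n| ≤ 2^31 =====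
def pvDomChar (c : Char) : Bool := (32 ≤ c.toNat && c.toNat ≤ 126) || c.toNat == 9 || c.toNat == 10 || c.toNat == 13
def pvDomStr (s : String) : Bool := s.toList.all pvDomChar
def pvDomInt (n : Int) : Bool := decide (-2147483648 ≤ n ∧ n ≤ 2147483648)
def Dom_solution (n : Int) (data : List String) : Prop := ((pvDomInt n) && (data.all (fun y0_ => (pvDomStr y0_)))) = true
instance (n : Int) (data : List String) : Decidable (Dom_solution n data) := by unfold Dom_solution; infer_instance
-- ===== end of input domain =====

-- B replaces A's generate-and-test over all 40320 permutations (count violators, subtract from the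
-- total) by a recursive backtracking search that places people one at a time, checks a constraint as
-- soon as both of its people are placed, and prunes violating branches (objective: alternative).

-- ===== PORT A =====
def pvPeople : List Char := ['A', 'C', 'F', 'J', 'M', 'N', 'R', 'T']

-- one constraint string j checked against permutation i exactly as A's inner-loop body does;
-- true = A would do `answer += 1; break` on this j (none-cases are where Python raises: excluded by Pre_)
def pvViol (i : List Char) (j : String) : Bool :=
  match PySem.Str.pyGet? j 0, PySem.Str.pyGet? j 2, PySem.Str.pyGet? j 3, PySem.Str.pyGet? j 4 with
  | some first, some second, some case_, some numc =>
    match PySem.Int.ofStr? (String.ofList [numc]), PySem.List.index? i first, PySem.List.index? i second with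
    | some num, some n1, some n2 =>
      let dist : Int := |(n1 : Int) - (n2 : Int)| - 1
      if case_ = '=' then decide (dist ≠ num)
      else if case_ = '<' then decide (num ≤ dist)
      else if case_ = '>' then decide (dist ≤ num)
      else false
    | _, _, _ => false
  | _, _, _, _ => false

-- A's `for j in data: … break`: contribution of one permutation to `answer`
def pvFindViol (i : List Char) : List String → Int
  | [] => 0
  | j :: rest => if pvViol i j then 1 else pvFindViol i rest

def solution (n : Int) (data : List String) : Int :=
  let pairs := PySem.List.permutations pvPeople 8
  let answer := pairs.foldl (fun acc i => acc + pvFindViol i data) 0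
  (pairs.length : Int) - answer

-- ===== PORT B =====
-- (j[0], j[2], j[3], int(j[4])) of Source B's comprehension
def pvParse? (j : String) : Option (Char × Char × Char × Int) :=
  match PySem.Str.pyGet? j 0, PySem.Str.pyGet? j 2, PySem.Str.pyGet? j 3, PySem.Str.pyGet? j 4 with
  | some a, some b, some op, some numc =>
    (PySem.Int.ofStr? (String.ofList [numc])).map (fun num => (a, b, op, num))
  | _, _, _, _ => none

-- Source B's _sat
def pvSat (d : Int) (op : Char) (num : Int) : Bool :=
  if op = '=' then decide (d - 1 = num)
  else if op = '<' then decide (d - 1 < num)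
  else if op = '>' then decide (num < d - 1)
  else true

-- Source B's _check, one constraint: after putting p at the end of placed, a constraint involving p
-- whose endpoints are now all placed must hold
def pvCheckOne (placed : List Char) (p : Char) (c : Char × Char × Char × Int) : Bool :=
  let new := placed ++ [p]
  if (c.1 = p ∨ c.2.1 = p) ∧ c.1 ∈ new ∧ c.2.1 ∈ new then
    let q := if c.1 = p then c.2.1 else c.1
    match PySem.List.index? new q with
    | some k => pvSat ((placed.length : Int) - (k : Int)) c.2.2.1 c.2.2.2
    | none => true
  else true

-- Source B's mutually recursive _extend / _loop backtracking search
mutual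
def pvExtend (cons : List (Char × Char × Char × Int)) (placed remaining : List Char) : Int :=
  if remaining.isEmpty then 1
  else pvLoop cons placed [] remaining
termination_by (remaining.length, remaining.length + 1)

def pvLoop (cons : List (Char × Char × Char × Int)) (placed pre rest : List Char) : Int :=
  match rest with
  | [] => 0
  | p :: rs =>
    (if cons.all (fun c => pvCheckOne placed p c) then pvExtend cons (placed ++ [p]) (pre ++ rs)
     else 0)
      + pvLoop cons placed (pre ++ [p]) rs
termination_by (pre.length + rest.length, rest.length)
decreasing_by
  all_goals simp_wf
  all_goals omega
end

def solution_alt (n : Int) (data : List String) : Int :=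
  pvExtend (data.filterMap pvParse?) [] ['A', 'C', 'F', 'J', 'M', 'N', 'R', 'T']

-- ===== PRECONDITION & SPEC =====
-- Pre_ excludes data containing a malformed constraint string (shorter than 5 characters, a letter outside
-- the eight people, or a non-digit distance character): Python A raises (IndexError/ValueError) on such a
-- string whenever it reaches it, and can only return when an earlier constraint already breaks every
-- permutation first — B parses all constraints eagerly and raises there.
def Pre_solution (n : Int) (data : List String) : Prop :=
  ∀ j ∈ data, 5 ≤ j.toList.length ∧ j.toList.getD 0 ' ' ∈ pvPeople ∧
    j.toList.getD 2 ' ' ∈ pvPeople ∧ (j.toList.getD 4 ' ').isDigit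
instance (n : Int) (data : List String) : Decidable (Pre_solution n data) := by
  unfold Pre_solution; infer_instance

def pvWitness_solution : Int × List String := (0, ["A~C=1", "M~N>0"])

def Spec_solution (n : Int) (data : List String) (out : Int) : Prop := out = solution_alt n data
instance (n : Int) (data : List String) (out : Int) : Decidable (Spec_solution n data out) := by
  unfold Spec_solution; infer_instance

-- ===== CLAIM (what is proved, stated in full; the proofs are below) =====
def Claim_equal_solution : Prop := ∀ (n : Int) (data : List String),
  Dom_solution n data → Pre_solution n data → Spec_solution n data (solution n data)

-- ===== LEMMAS AND PROOFS =====

-- a full arrangement l satisfies constraint c (vacuously when an endpoint is absent)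
def pvSatFull (l : List Char) (c : Char × Char × Char × Int) : Bool :=
  match PySem.List.index? l c.1, PySem.List.index? l c.2.1 with
  | some n1, some n2 => pvSat |(n1 : Int) - (n2 : Int)| c.2.2.1 c.2.2.2
  | _, _ => true

-- `n1 <= n2` as Python's boolean negation of `n2 < n1` (aligns A's non-strict with B's strict tests)
lemma pvDecideLe (a b : Int) : decide (a ≤ b) = !decide (b < a) := by
  by_cases h : b < a
  · simp [h, not_le.mpr h]
  · simp [h, not_lt.mp h]

-- A's violation test for one constraint string is the negation of the full-arrangement check
lemma pvViol_eq (i : List Char) (j : String) :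
    pvViol i j = (match pvParse? j with
      | none => false
      | some c => !pvSatFull i c) := by
  rw [pvViol, pvParse?]
  cases PySem.Str.pyGet? j 0 with
  | none => rfl
  | some a =>
  cases PySem.Str.pyGet? j 2 with
  | none => rfl
  | some b =>
  cases PySem.Str.pyGet? j 3 with
  | none => rfl
  | some op =>
  cases PySem.Str.pyGet? j 4 with
  | none => rfl
  | some numc =>
  dsimp only
  cases PySem.Int.ofStr? (String.ofList [numc]) with
  | none => rfl
  | some num =>
  simp only [Option.map_some]
  cases h1 : PySem.List.index? i a with
  | none =>
    have h1' : List.idxOf? a i = none := by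
      simpa [PySem.List.index?_eq_idxOf?] using h1
    simp [pvSatFull, h1']
  | some n1 =>
  cases h2 : PySem.List.index? i b with
  | none =>
    have h1' : List.idxOf? a i = some n1 := by
      simpa [PySem.List.index?_eq_idxOf?] using h1
    have h2' : List.idxOf? b i = none := by
      simpa [PySem.List.index?_eq_idxOf?] using h2
    simp [pvSatFull, h1', h2']
  | some n2 =>
  simp only [pvSatFull, h1, h2]
  by_cases hEq : op = '=' <;> by_cases hLt : op = '<' <;> by_cases hGt : op = '>' <;>
    (simp [pvSat, hEq, hLt, hGt, pvDecideLe]; try omega)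

-- A's break-on-first-violation loop over data versus the all-constraints check
lemma pvFindViol_eq (i : List Char) : ∀ (data : List String),
    pvFindViol i data = if (data.filterMap pvParse?).all (fun c => pvSatFull i c) then 0 else 1 := by
  intro data
  induction data with
  | nil => rfl
  | cons j rest ih =>
    rw [pvFindViol, pvViol_eq]
    cases hp : pvParse? j with
    | none => simp [hp, ih]
    | some c =>
      by_cases hc : pvSatFull i c <;> simp [hp, hc, ih]

-- A counts exactly the full arrangements on which every parsed constraint holds
lemma solution_eq_countP (n : Int) (data : List String) :
    solution n data = ((PySem.List.permutations pvPeople 8).countP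
      (fun i => (data.filterMap pvParse?).all (fun c => pvSatFull i c)) : Int) := by
  unfold solution
  show ((PySem.List.permutations pvPeople 8).length : Int)
      - (PySem.List.permutations pvPeople 8).foldl (fun acc i => acc + pvFindViol i data) 0 = _
  set pairs := PySem.List.permutations pvPeople 8 with hpairs
  rw [PySem.List.foldl_add pairs (fun i => pvFindViol i data) 0]
  have hmap : pairs.map (fun i => pvFindViol i data)
      = pairs.map (fun i =>
          if !(data.filterMap pvParse?).all (fun c => pvSatFull i c) then 1 else 0) := by
    apply List.map_congr_left
    intro i _
    rw [pvFindViol_eq]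
    cases h : (data.filterMap pvParse?).all (fun c => pvSatFull i c) <;> simp
  rw [hmap, PySem.List.sum_map_ite_one_zero]
  have hcount := List.length_eq_countP_add_countP
    (fun i => (data.filterMap pvParse?).all (fun c => pvSatFull i c)) (l := pairs)
  have hnot : pairs.countP
        (fun i => decide ¬((data.filterMap pvParse?).all (fun c => pvSatFull i c) = true))
      = pairs.countP (fun i => !(data.filterMap pvParse?).all (fun c => pvSatFull i c)) := by
    apply List.countP_congr; intro x _; simp
  rw [hnot] at hcount
  omega

-- index of an element of l is unchanged by appending
lemma pvIndex?_append_left (l l' : List Char) (a : Char) (h : a ∈ l) :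
    PySem.List.index? (l ++ l') a = PySem.List.index? l a := by
  induction l with
  | nil => simp at h
  | cons x xs ih =>
    by_cases hx : a = x
    · subst hx; rw [List.cons_append, PySem.List.index?_cons_self, PySem.List.index?_cons_self]
    · rw [List.cons_append, PySem.List.index?_cons_of_ne _ (fun he => hx he.symm),
        PySem.List.index?_cons_of_ne _ (fun he => hx he.symm), ih (by simpa [hx] using h)]

-- a fresh element appended at the end sits at index l.length
lemma pvIndex?_append_self (l : List Char) (a : Char) (h : a ∉ l) :
    PySem.List.index? (l ++ [a]) a = some l.length := by
  induction l with
  | nil => rw [List.nil_append, PySem.List.index?_cons_self]; rfl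
  | cons x xs ih =>
    have hx : a ≠ x := by rintro rfl; simp at h
    rw [List.cons_append, PySem.List.index?_cons_of_ne _ (fun he => hx he.symm),
      ih (by simp at h; tauto)]
    simp

-- a found index is within the list
lemma pvIndex?_lt (l : List Char) (a : Char) (k : Nat) (h : PySem.List.index? l a = some k) :
    k < l.length := by
  induction l generalizing k with
  | nil => simp [PySem.List.index?_eq_idxOf?] at h
  | cons x xs ih =>
    by_cases hx : a = x
    · subst hx; rw [PySem.List.index?_cons_self] at h
      cases h; simp
    · rw [PySem.List.index?_cons_of_ne _ (fun he => hx he.symm)] at h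
      cases hk : PySem.List.index? xs a with
      | none => rw [hk] at h; simp at h
      | some m =>
        rw [hk] at h
        simp at h
        have := ih m hk
        simp; omega

-- placing p at the end of `placed`: the full check decomposes into the old check and Source B's _check
lemma pvSatFull_snoc (placed : List Char) (p : Char) (c : Char × Char × Char × Int)
    (hp : p ∉ placed) :
    pvSatFull (placed ++ [p]) c = (pvSatFull placed c && pvCheckOne placed p c) := by
  obtain ⟨a, b, op, num⟩ := c
  simp only [pvSatFull, pvCheckOne]
  have hnone : ∀ x : Char, x ∉ placed → x ≠ p → PySem.List.index? (placed ++ [p]) x = none := by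
    intro x hx hxp
    rw [PySem.List.index?_eq_none_iff]
    simp [hx, hxp]
  have hnone' : ∀ x : Char, x ∉ placed → PySem.List.index? placed x = none := by
    intro x hx; rw [PySem.List.index?_eq_none_iff]; exact hx
  by_cases hap : a = p
  · subst hap
    have e1 := pvIndex?_append_self placed a hp
    have e0 := hnone' a hp
    by_cases hbp : b = a
    · subst hbp
      simp only [PySem.List.index?_eq_idxOf?] at e1 e0
      simp [e1, e0, pvSat]
    · by_cases hbm : b ∈ placed
      · obtain ⟨k, hk⟩ := Option.isSome_iff_exists.mp
          ((PySem.List.index?_isSome_iff placed b).mpr hbm)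
        have hklt := pvIndex?_lt placed b k hk
        have e2 : PySem.List.index? (placed ++ [a]) b = some k := by
          rw [pvIndex?_append_left placed [a] b hbm, hk]
        have habs : |(placed.length : Int) - (k : Int)| = (placed.length : Int) - (k : Int) := by
          rw [abs_of_nonneg]; omega
        simp only [PySem.List.index?_eq_idxOf?] at e1 e2 e0 hk
        simp [e1, e2, e0, hbm, habs]
      · have e2 := hnone b hbm hbp
        have e0b := hnone' b hbm
        simp only [PySem.List.index?_eq_idxOf?] at e1 e2 e0 e0b
        simp [e1, e2, e0, e0b, hbm, hbp]
  · by_cases hbp : b = p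
    · subst hbp
      have e1 := pvIndex?_append_self placed b hp
      have e0 := hnone' b hp
      by_cases ham : a ∈ placed
      · obtain ⟨k, hk⟩ := Option.isSome_iff_exists.mp
          ((PySem.List.index?_isSome_iff placed a).mpr ham)
        have hklt := pvIndex?_lt placed a k hk
        have e2 : PySem.List.index? (placed ++ [b]) a = some k := by
          rw [pvIndex?_append_left placed [b] a ham, hk]
        have habs : |(k : Int) - (placed.length : Int)| = (placed.length : Int) - (k : Int) := by
          rw [abs_of_nonpos] <;> omega
        simp only [PySem.List.index?_eq_idxOf?] at e1 e2 e0 hk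
        simp [e1, e2, e0, ham, hap, habs]
      · have e2 := hnone a ham hap
        have e0a := hnone' a ham
        simp only [PySem.List.index?_eq_idxOf?] at e1 e2 e0 e0a
        simp [e1, e2, e0, e0a, ham, hap]
    · simp only [hap, hbp, or_self, false_and, if_false, Bool.and_true]
      by_cases ham : a ∈ placed
      · rw [pvIndex?_append_left placed [p] a ham]
        by_cases hbm : b ∈ placed
        · rw [pvIndex?_append_left placed [p] b hbm]
        · rw [hnone b hbm hbp, hnone' b hbm]
      · rw [hnone a ham hap, hnone' a ham]

-- a violated constraint stays violated in every extension of the arrangement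
lemma pvSatFull_false_append (l l' : List Char) (c : Char × Char × Char × Int)
    (h : pvSatFull l c = false) : pvSatFull (l ++ l') c = false := by
  rw [pvSatFull] at h ⊢
  cases h1 : PySem.List.index? l c.1 with
  | none => rw [h1] at h; simp at h
  | some n1 =>
    cases h2 : PySem.List.index? l c.2.1 with
    | none => rw [h1, h2] at h; simp at h
    | some n2 =>
      rw [h1, h2] at h
      have m1 : c.1 ∈ l := (PySem.List.index?_isSome_iff l c.1).mp (by rw [h1]; rfl)
      have m2 : c.2.1 ∈ l := (PySem.List.index?_isSome_iff l c.2.1).mp (by rw [h2]; rfl)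
      rw [pvIndex?_append_left l l' c.1 m1, pvIndex?_append_left l l' c.2.1 m2, h1, h2]
      exact h

-- all-constraints version of pvSatFull_snoc
lemma pvAll_snoc (cons : List (Char × Char × Char × Int)) (placed : List Char) (p : Char)
    (hp : p ∉ placed) :
    cons.all (fun c => pvSatFull (placed ++ [p]) c)
      = (cons.all (fun c => pvSatFull placed c) && cons.all (fun c => pvCheckOne placed p c)) := by
  induction cons with
  | nil => rfl
  | cons c cs ih =>
    simp only [List.all_cons, ih, pvSatFull_snoc placed p c hp]
    cases pvSatFull placed c <;> cases pvCheckOne placed p c <;>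
      cases cs.all (fun c => pvSatFull placed c) <;> simp

-- the Python-exact permutations list unfolded one selection step
lemma pvPerms_succ (xs : List Char) (r : Nat) : PySem.List.permutations xs (r + 1) =
    (List.range xs.length).flatMap (fun i => match xs[i]? with
      | none => []
      | some x => (PySem.List.permutations (xs.eraseIdx i) r).map (fun π => x :: π)) := by
  rw [PySem.List.permutations.eq_2]
  congr 1
  funext i
  cases xs[i]? <;> simp

-- the backtracking loop counts, among the arrangements obtained by picking each element of `rest`
-- next (the skipped prefix `pre` going back into the pool), those satisfying every constraint
lemma pvLoop_eq (cons : List (Char × Char × Char × Int)) (N : Nat)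
    (IH : ∀ (placed rem : List Char), rem.length = N → (placed ++ rem).Nodup →
      cons.all (fun c => pvSatFull placed c) = true →
      pvExtend cons placed rem = ((PySem.List.permutations rem rem.length).countP
        (fun π => cons.all (fun c => pvSatFull (placed ++ π) c)) : Int)) :
    ∀ (rest pre placed : List Char), (pre ++ rest).length = N + 1 →
      (placed ++ (pre ++ rest)).Nodup →
      cons.all (fun c => pvSatFull placed c) = true →
      pvLoop cons placed pre rest =
        (((List.range rest.length).flatMap (fun i => match rest[i]? with
            | none => []
            | some x => (PySem.List.permutations (pre ++ rest.eraseIdx i) N).map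
                (fun π => x :: π))).countP
          (fun π => cons.all (fun c => pvSatFull (placed ++ π) c)) : Int) := by
  intro rest
  induction rest with
  | nil =>
    intro pre placed _ _ _
    rw [pvLoop]
    simp
  | cons p rs ihrest =>
    intro pre placed hlen hnd hinv
    have hpp : p ∉ placed := by
      have hdisj := (List.nodup_append.mp hnd).2.2
      intro hmem
      exact hdisj p hmem p (by simp) rfl
    have hlen' : (pre ++ rs).length = N := by
      simp at hlen ⊢; omega
    -- the tail of the selection list, re-indexed
    have hmapbody :
        (((List.range rs.length).map (fun i => i + 1)).flatMap (fun i => match (p :: rs)[i]? with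
            | none => []
            | some x => (PySem.List.permutations (pre ++ (p :: rs).eraseIdx i) N).map
                (fun π => x :: π)))
          = (List.range rs.length).flatMap (fun i => match rs[i]? with
            | none => []
            | some x => (PySem.List.permutations ((pre ++ [p]) ++ rs.eraseIdx i) N).map
                (fun π => x :: π)) := by
      rw [List.flatMap_map]
      congr 1
      funext i
      simp only [List.getElem?_cons_succ, List.eraseIdx_cons_succ]
      cases rs[i]? with
      | none => rfl
      | some x => rw [List.append_cons]
    rw [pvLoop, List.length_cons, List.range_succ_eq_map, List.flatMap_cons, List.countP_append,
      hmapbody]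
    have hnd2 : (placed ++ ((pre ++ [p]) ++ rs)).Nodup := by
      simpa [List.append_assoc] using hnd
    have hlen2 : ((pre ++ [p]) ++ rs).length = N + 1 := by
      simp at hlen ⊢; omega
    rw [ihrest (pre ++ [p]) placed hlen2 hnd2 hinv]
    -- head selection: p goes next
    have hP : ∀ π : List Char,
        (cons.all (fun c => pvSatFull (placed ++ (p :: π)) c))
          = cons.all (fun c => pvSatFull ((placed ++ [p]) ++ π) c) := by
      intro π
      rw [List.append_cons]
    simp only [List.getElem?_cons_zero, List.eraseIdx_cons_zero, List.countP_map]
    by_cases hchk : cons.all (fun c => pvCheckOne placed p c)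
    · have hinv' : cons.all (fun c => pvSatFull (placed ++ [p]) c) = true := by
        simp [pvAll_snoc cons placed p hpp, hinv, hchk]
      have hnd3 : ((placed ++ [p]) ++ (pre ++ rs)).Nodup := by
        have hperm : (placed ++ (pre ++ p :: rs)).Perm (placed ++ (p :: (pre ++ rs))) :=
          List.Perm.append_left placed List.perm_middle
        have := hperm.nodup hnd
        simpa [List.append_assoc] using this
      have hext := IH (placed ++ [p]) (pre ++ rs) hlen' hnd3 hinv'
      rw [hlen'] at hext
      rw [if_pos hchk, hext]
      have hfun : ((fun π => cons.all fun c => pvSatFull (placed ++ π) c) ∘ fun π => p :: π)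
          = fun π => cons.all fun c => pvSatFull ((placed ++ [p]) ++ π) c := by
        funext π
        simp only [Function.comp_apply]
        exact hP π
      rw [hfun]
      push_cast
      ring
    · have hallf : cons.all (fun c => pvCheckOne placed p c) = false := by
        cases hv : cons.all (fun c => pvCheckOne placed p c)
        · rfl
        · exact absurd hv hchk
      obtain ⟨c0, hc0mem, hc0⟩ := List.all_eq_false.mp hallf
      have hfail : pvSatFull (placed ++ [p]) c0 = false := by
        rw [pvSatFull_snoc placed p c0 hpp]
        simp at hc0
        simp [hc0]
      have hzero : ((PySem.List.permutations (pre ++ rs) N).countP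
          ((fun π => cons.all fun c => pvSatFull (placed ++ π) c) ∘ fun π => p :: π)) = 0 := by
        apply List.countP_eq_zero.mpr
        intro π _
        simp only [Function.comp_apply, hP π]
        intro hall
        have := List.all_eq_true.mp hall c0 hc0mem
        rw [pvSatFull_false_append (placed ++ [p]) π c0 hfail] at this
        exact absurd this (by simp)
      rw [if_neg hchk, hzero]
      push_cast
      ring

-- the backtracking search counts the satisfying completions
lemma pvExtend_eq (cons : List (Char × Char × Char × Int)) : ∀ (N : Nat) (placed rem : List Char),
    rem.length = N → (placed ++ rem).Nodup →
    cons.all (fun c => pvSatFull placed c) = true →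
    pvExtend cons placed rem = ((PySem.List.permutations rem rem.length).countP
      (fun π => cons.all (fun c => pvSatFull (placed ++ π) c)) : Int) := by
  intro N
  induction N with
  | zero =>
    intro placed rem hlen _ hinv
    rw [List.length_eq_zero_iff.mp hlen]
    simp [pvExtend, hinv]
  | succ N ihN =>
    intro placed rem hlen hnd hinv
    have hne : rem.isEmpty = false := by
      cases rem
      · simp at hlen
      · rfl
    rw [pvExtend, if_neg (by simp [hne]), hlen,
      pvLoop_eq cons N ihN rem [] placed (by simpa using hlen) (by simpa using hnd) hinv,
      pvPerms_succ]
    congr 2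

-- ===== VERDICT (by name: the statement is the Claim_ definition above) =====
theorem solution_spec : Claim_equal_solution := by
  intro n data _ _
  unfold Spec_solution
  rw [solution_eq_countP]
  show _ = pvExtend (data.filterMap pvParse?) [] pvPeople
  rw [pvExtend_eq (data.filterMap pvParse?) 8 [] pvPeople (by decide) (by decide)
    (by
      apply List.all_eq_true.mpr
      intro c _
      rw [pvSatFull, (PySem.List.index?_eq_none_iff [] c.1).mpr (by simp)])]
  show ((PySem.List.permutations pvPeople 8).countP _ : Int)
    = ((PySem.List.permutations pvPeople pvPeople.length).countP _ : Int)
  norm_num [pvPeople]
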